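-- pv_equiv track=rewrite | github.com/czytkx/Automatic-testing | Bugine-master/new_api.py | keywords_in_content
-- ===== SOURCE A (Python) =====
-- def keywords_in_content(hot_keywords: dict, content_words: list, weight=False) -> int:
--     # get key words key = score
--     count_dict = {}
--     for k in content_words:
--         if k in hot_keywords:
--             if k not in count_dict:
--                 if weight:
--                     count_dict[k] = hot_keywords[k]  # 要不要给keywords加上分数呢？
--                 else:
--                     count_dict[k] = 1
--             elif weight:
--                 count_dict[k] += 1 * hot_keywords[k]  # 要不要给keywords加上分数呢？
--             else:
--                 count_dict[k] += 1
--     score = 0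
--     for k in count_dict:
--         score += count_dict[k]
--     return score
-- ===== SOURCE B (Python) =====
-- def keywords_in_content(hot_keywords: dict, content_words: list, weight=False) -> int:
--     # One streaming pass: no intermediate count table, just accumulate the score.
--     score = 0
--     for w in content_words:
--         v = hot_keywords.get(w)
--         if v is not None:
--             score += v if weight else 1
--     return score
-- ===== Notes on version B (the rewrite author's own statement) =====
-- stated objective: simpler
-- what changed: Drops the intermediate count_dict entirely: instead of building a per-word count/score table and then summing it in a second loop, B accumulates the score directly in a single streaming pass over content_words.
import Mathlib
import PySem

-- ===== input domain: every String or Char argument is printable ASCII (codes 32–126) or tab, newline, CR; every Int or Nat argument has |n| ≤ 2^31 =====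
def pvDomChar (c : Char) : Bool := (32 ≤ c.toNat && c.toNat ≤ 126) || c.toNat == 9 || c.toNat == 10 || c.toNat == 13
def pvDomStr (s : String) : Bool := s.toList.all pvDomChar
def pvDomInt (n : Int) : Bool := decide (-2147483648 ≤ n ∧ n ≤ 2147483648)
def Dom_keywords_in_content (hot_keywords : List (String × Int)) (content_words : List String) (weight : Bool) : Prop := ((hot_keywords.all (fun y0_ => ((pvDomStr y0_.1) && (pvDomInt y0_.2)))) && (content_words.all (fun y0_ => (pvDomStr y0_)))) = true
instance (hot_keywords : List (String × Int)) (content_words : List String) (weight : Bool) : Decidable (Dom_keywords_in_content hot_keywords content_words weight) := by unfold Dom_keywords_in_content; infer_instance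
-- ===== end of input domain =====

-- B replaces A's build-count-table-then-sum with a single streaming score accumulation (simpler; same asymptotic cost).


-- ===== PORT A =====
def keywords_in_content (hot_keywords : List (String × Int)) (content_words : List String) (weight : Bool) : Int :=
  let hk : PySem.Dict String Int := PySem.Dict.mk hot_keywords
  let cd : PySem.Dict String Int :=
    content_words.foldl (fun cd k =>
      if hk.contains k then
        if !cd.contains k then
          if weight then cd.insert k (hk.getD k 0) else cd.insert k 1
        else if weight then cd.modify k 0 (fun x => x + 1 * hk.getD k 0)
        else cd.modify k 0 (fun x => x + 1)
      else cd) PySem.Dict.empty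
  -- `for k in count_dict: score += count_dict[k]` — k is always a key of cd, so getD's default is never used
  cd.keys.foldl (fun score k => score + cd.getD k 0) 0

-- ===== PORT B =====
def keywords_in_content_alt (hot_keywords : List (String × Int)) (content_words : List String) (weight : Bool) : Int :=
  let hk : PySem.Dict String Int := PySem.Dict.mk hot_keywords
  content_words.foldl (fun score w =>
    match hk.get? w with
    | some v => score + (if weight then v else 1)
    | none => score) 0

-- ===== PRECONDITION & SPEC =====
def Spec_keywords_in_content (hot_keywords : List (String × Int)) (content_words : List String) (weight : Bool) (out : Int) : Prop := out = keywords_in_content_alt hot_keywords content_words weight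
instance (hot_keywords : List (String × Int)) (content_words : List String) (weight : Bool) (out : Int) : Decidable (Spec_keywords_in_content hot_keywords content_words weight out) := by unfold Spec_keywords_in_content; infer_instance

-- ===== CLAIM (what is proved, stated in full; the proofs are below) =====
def Claim_equal_keywords_in_content : Prop := ∀ (hot_keywords : List (String × Int)) (content_words : List String) (weight : Bool), Dom_keywords_in_content hot_keywords content_words weight → Spec_keywords_in_content hot_keywords content_words weight (keywords_in_content hot_keywords content_words weight)

-- ===== LEMMAS AND PROOFS =====

-- sum of the values of a dict (what A's second loop computes)
def vsum (d : PySem.Dict String Int) : Int := (d.items.map Prod.snd).sum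

-- B's per-word contribution
def contrib (hk : PySem.Dict String Int) (weight : Bool) (w : String) : Int :=
  match hk.get? w with
  | some v => if weight then v else 1
  | none => 0

-- replacing the (unique) entry with key w by (w, v0 + c) raises the value-sum by c
lemma sum_replace (l : List (String × Int)) (w : String) (v0 c : Int)
    (hnd : (l.map Prod.fst).Nodup) (hmem : (w, v0) ∈ l) :
    ((l.map (fun p => if (p.1 == w) = true then (w, v0 + c) else p)).map Prod.snd).sum
      = (l.map Prod.snd).sum + c := by
  induction l with
  | nil => simp at hmem
  | cons p t ih =>
    simp only [List.map_cons, List.nodup_cons] at hnd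
    rcases List.mem_cons.mp hmem with h | h
    · subst h
      rw [List.map_cons, if_pos (by simp : ((w, v0).1 == w) = true)]
      have ht : t.map (fun p => if (p.1 == w) = true then (w, v0 + c) else p) = t := by
        have h0 : ∀ q ∈ t, (if (q.1 == w) = true then (w, v0 + c) else q) = id q := by
          intro q hq
          have : q.1 ≠ w := by
            intro he
            have hm : q.1 ∈ t.map Prod.fst := List.mem_map_of_mem (f := Prod.fst) hq
            exact hnd.1 (he ▸ hm)
          simp [this]
        rw [List.map_congr_left h0, List.map_id]
      rw [ht]; simp [List.sum_cons]; ring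
    · have hpw : p.1 ≠ w := by
        intro he
        have hm : (w, v0).1 ∈ t.map Prod.fst := List.mem_map_of_mem (f := Prod.fst) h
        exact hnd.1 (he ▸ hm)
      rw [List.map_cons, if_neg (by simp [hpw] : ¬ ((p.1 == w) = true))]
      simp only [List.map_cons, List.sum_cons, ih hnd.2 h]
      ring

-- inserting at a fresh key appends its value to the sum
lemma vsum_insert_fresh (d : PySem.Dict String Int) (w : String) (c : Int)
    (h : d.contains w = false) : vsum (d.insert w c) = vsum d + c := by
  unfold vsum
  rw [PySem.Dict.items_insert_of_not_contains d c h]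
  simp

-- incrementing an existing key's value by c raises the sum by c
lemma vsum_insert_incr (d : PySem.Dict String Int) (w : String) (c : Int)
    (hnd : d.keys.Nodup) (h : d.contains w = true) :
    vsum (d.insert w (d.getD w 0 + c)) = vsum d + c := by
  unfold vsum
  rw [PySem.Dict.items_insert_of_contains d _ h]
  have hget : (d.get? w).isSome := by rw [← PySem.Dict.contains_eq_isSome_get?, h]
  obtain ⟨v0, hv0⟩ := Option.isSome_iff_exists.mp hget
  have hmem : (w, v0) ∈ d.items := PySem.Dict.mem_items_of_get?_eq_some d hv0
  have hgd : d.getD w 0 = v0 := PySem.Dict.getD_of_mem_items d hmem hnd 0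
  rw [hgd]
  exact sum_replace d.items w v0 c hnd hmem

-- A's loop step
def stepA (hk : PySem.Dict String Int) (weight : Bool)
    (cd : PySem.Dict String Int) (k : String) : PySem.Dict String Int :=
  if hk.contains k then
    if !cd.contains k then
      if weight then cd.insert k (hk.getD k 0) else cd.insert k 1
    else if weight then cd.modify k 0 (fun x => x + 1 * hk.getD k 0)
    else cd.modify k 0 (fun x => x + 1)
  else cd

lemma stepA_nodup (hk : PySem.Dict String Int) (weight : Bool)
    (cd : PySem.Dict String Int) (k : String) (hnd : cd.keys.Nodup) :
    (stepA hk weight cd k).keys.Nodup := by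
  unfold stepA PySem.Dict.modify
  split_ifs <;> first | exact hnd | exact PySem.Dict.nodup_keys_insert cd k _ hnd

lemma stepA_vsum (hk : PySem.Dict String Int) (weight : Bool)
    (cd : PySem.Dict String Int) (k : String) (hnd : cd.keys.Nodup) :
    vsum (stepA hk weight cd k) = vsum cd + contrib hk weight k := by
  by_cases hc : hk.contains k = true
  · have hget : (hk.get? k).isSome := by rw [← PySem.Dict.contains_eq_isSome_get?, hc]
    obtain ⟨v, hv⟩ := Option.isSome_iff_exists.mp hget
    have hgd : hk.getD k 0 = v := by rw [PySem.Dict.getD_eq_get?_getD, hv]; rfl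
    by_cases hcd : cd.contains k = true
    · have h1 : vsum (cd.modify k 0 (fun x => x + hk.getD k 0)) = vsum cd + v := by
        unfold PySem.Dict.modify; rw [hgd]
        simpa using vsum_insert_incr cd k v hnd hcd
      have h2 : vsum (cd.modify k 0 (fun x => x + 1)) = vsum cd + 1 := by
        unfold PySem.Dict.modify
        simpa using vsum_insert_incr cd k 1 hnd hcd
      cases weight <;> simp [stepA, contrib, hc, hcd, hv, h1, h2]
    · have hcd' : cd.contains k = false := by simpa using hcd
      cases weight <;>
        simp [stepA, contrib, hc, hcd', hv, hgd, vsum_insert_fresh cd k _ hcd']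
  · have hc' : hk.contains k = false := by simpa using hc
    have hn : hk.get? k = none := by
      have := PySem.Dict.contains_eq_isSome_get? hk k
      rw [hc'] at this
      exact Option.not_isSome_iff_eq_none.mp (by simp [← this])
    simp [stepA, contrib, hc', hn]

lemma loop_vsum (hk : PySem.Dict String Int) (weight : Bool) :
    ∀ (l : List String) (cd : PySem.Dict String Int), cd.keys.Nodup →
      vsum (l.foldl (stepA hk weight) cd) = vsum cd + (l.map (contrib hk weight)).sum := by
  intro l
  induction l with
  | nil => intro cd _; simp
  | cons w t ih =>
    intro cd hnd
    rw [List.foldl_cons, ih _ (stepA_nodup hk weight cd w hnd),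
        stepA_vsum hk weight cd w hnd, List.map_cons, List.sum_cons]
    ring

lemma loop_nodup (hk : PySem.Dict String Int) (weight : Bool) :
    ∀ (l : List String) (cd : PySem.Dict String Int), cd.keys.Nodup →
      (l.foldl (stepA hk weight) cd).keys.Nodup := by
  intro l
  induction l with
  | nil => intro cd h; exact h
  | cons w t ih => intro cd h; exact ih _ (stepA_nodup hk weight cd w h)

-- ===== VERDICT (by name: the statement is the Claim_ definition above) =====
theorem keywords_in_content_spec : Claim_equal_keywords_in_content := by
  intro hot_keywords content_words weight _
  unfold Spec_keywords_in_content keywords_in_content keywords_in_content_alt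
  set hk : PySem.Dict String Int := PySem.Dict.mk hot_keywords with hhk
  set cd := content_words.foldl (stepA hk weight) PySem.Dict.empty with hcd
  have hfold : content_words.foldl
      (fun cd k =>
        if hk.contains k then
          if !cd.contains k then
            if weight then cd.insert k (hk.getD k 0) else cd.insert k 1
          else if weight then cd.modify k 0 (fun x => x + 1 * hk.getD k 0)
          else cd.modify k 0 (fun x => x + 1)
        else cd) PySem.Dict.empty = cd := rfl
  have hnd : cd.keys.Nodup := loop_nodup hk weight content_words _ PySem.Dict.nodup_keys_empty
  have hA : cd.keys.foldl (fun score k => score + cd.getD k 0) 0 = vsum cd := by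
    rw [PySem.List.foldl_add cd.keys (fun k => cd.getD k 0) 0]
    unfold vsum
    rw [PySem.Dict.items_eq_map_keys cd hnd 0]
    simp [Function.comp_def]
  have hB : content_words.foldl
      (fun score w =>
        match hk.get? w with
        | some v => score + (if weight then v else 1)
        | none => score) 0
      = (content_words.map (contrib hk weight)).sum := by
    have he : (fun (score : Int) (w : String) =>
        match hk.get? w with
        | some v => score + (if weight then v else 1)
        | none => score) = fun score w => score + contrib hk weight w := by
      funext s w
      unfold contrib
      cases hk.get? w <;> simp
    rw [he, PySem.List.foldl_add]
    simp
  simp only [hfold, hA, hB]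
  rw [loop_vsum hk weight content_words _ PySem.Dict.nodup_keys_empty]
  simp [vsum, PySem.Dict.empty]
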